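-- pv_equiv track=rewrite | github.com/wlgh0327/algo_study | coding_test/03.py | get_used_color
-- ===== SOURCE A (Python) =====
-- def find_index(data, target) :
-- 	res = []
-- 	lis = data
-- 	while True :
-- 		try :
-- 			res.append(lis.index(target) + (res[-1]+1 if len(res) != 0 else 0))
-- 			lis = data[res[-1]+1:]
-- 		except :
-- 			break
-- 	return res
--
-- def get_used_color(data) :
-- 	used_color = []
-- 	for c_idx in range(1, 10) :
-- 		for i in range(len(data)) :
-- 			index_arr = find_index(data[i], c_idx)
-- 			if index_arr :
-- 				used_color.append(c_idx)
-- 				break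
-- 	return used_color
-- ===== SOURCE B (Python) =====
-- def get_used_color(data):
--     seen = set()
--     for row in data:
--         seen.update(row)
--     return [c for c in range(1, 10) if c in seen]
-- ===== Notes on version B (the rewrite author's own statement) =====
-- stated objective: alternative
-- what changed: A scans the whole grid once per color 1..9 (find_index repeatedly slicing the row to collect all positions); B makes a single pass collecting every cell value into a set and then reports which of 1..9 are present; it trades A's nine early-exit scans for one full pass with per-element hashing, so it is not measurably faster.
import Mathlib
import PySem

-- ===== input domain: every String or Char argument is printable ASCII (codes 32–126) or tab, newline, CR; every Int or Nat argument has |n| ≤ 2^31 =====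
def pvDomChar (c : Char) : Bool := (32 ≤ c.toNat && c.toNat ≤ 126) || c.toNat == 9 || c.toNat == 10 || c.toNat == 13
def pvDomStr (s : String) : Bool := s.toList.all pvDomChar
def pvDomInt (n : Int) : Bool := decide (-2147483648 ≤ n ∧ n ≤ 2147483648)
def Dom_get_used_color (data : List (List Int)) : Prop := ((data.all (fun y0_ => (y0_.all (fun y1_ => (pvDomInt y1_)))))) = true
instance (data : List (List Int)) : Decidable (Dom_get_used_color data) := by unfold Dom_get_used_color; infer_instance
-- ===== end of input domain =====

-- B replaces A's per-color grid scans (find_index collecting all positions by repeated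
-- slicing) by a single collect-into-a-set pass plus a report over 1..9 (alternative, not faster).

-- ===== PORT A =====
-- while-loop of find_index; fuel (data.length + 1) only makes the same computation total:
-- each appended index is strictly larger than the previous, so at most data.length appends happen.
def find_index_aux (data : List Int) (target : Int) : Nat → List Int → List Int → List Int
  | 0, res, _ => res
  | fuel + 1, res, lis =>
    match PySem.List.index? lis target with
    | none => res
    | some i =>
      let newv : Int := (i : Int) + (match res.getLast? with | some l => l + 1 | none => 0)
      find_index_aux data target fuel (res ++ [newv]) (PySem.List.slice data (some (newv + 1)) none)

def find_index (data : List Int) (target : Int) : List Int :=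
  find_index_aux data target (data.length + 1) [] data

-- inner 'for i in range(len(data)): if find_index(data[i], c): … break'
def rowScanA (c : Int) : List (List Int) → Bool
  | [] => false
  | row :: rest => if find_index row c ≠ [] then true else rowScanA c rest

def get_used_color (data : List (List Int)) : List Int :=
  (PySem.List.pyRange 1 10 1).foldl
    (fun used c => if rowScanA c data then used ++ [c] else used) []

-- ===== PORT B =====
def get_used_color_alt (data : List (List Int)) : List Int :=
  let seen : PySem.Set Int := data.foldl (fun s row => PySem.Set.update s row) PySem.Set.empty
  (PySem.List.pyRange 1 10 1).filter (fun c => PySem.Set.contains seen c)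

-- ===== PRECONDITION & SPEC =====
def Spec_get_used_color (data : List (List Int)) (out : List Int) : Prop := out = get_used_color_alt data
instance (data : List (List Int)) (out : List Int) : Decidable (Spec_get_used_color data out) := by unfold Spec_get_used_color; infer_instance

-- ===== CLAIM (what is proved, stated in full; the proofs are below) =====
def Claim_equal_get_used_color : Prop := ∀ (data : List (List Int)), Dom_get_used_color data → Spec_get_used_color data (get_used_color data)

-- ===== LEMMAS AND PROOFS =====

theorem find_index_aux_ne_nil (data : List Int) (target : Int) (fuel : Nat) (res lis : List Int)
    (h : res ≠ []) : find_index_aux data target fuel res lis ≠ [] := by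
  induction fuel generalizing res lis with
  | zero => simpa [find_index_aux] using h
  | succ n ih =>
    simp only [find_index_aux]
    cases PySem.List.index? lis target with
    | none => exact h
    | some i => exact ih _ _ (by simp)

theorem find_index_ne_nil (row : List Int) (c : Int) (hc : c ∈ row) :
    find_index row c ≠ [] := by
  obtain ⟨i, hi⟩ := Option.isSome_iff_exists.mp ((PySem.List.index?_isSome_iff row c).mpr hc)
  unfold find_index
  simp only [find_index_aux, hi]
  exact find_index_aux_ne_nil _ _ _ _ _ (by simp)

theorem find_index_eq_nil_iff (row : List Int) (c : Int) :
    find_index row c = [] ↔ c ∉ row := by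
  by_cases hc : c ∈ row
  · exact iff_of_false (find_index_ne_nil row c hc) (by simpa using hc)
  · have h : PySem.List.index? row c = none := (PySem.List.index?_eq_none_iff row c).mpr hc
    unfold find_index
    simp only [find_index_aux, h]
    exact iff_of_true (by simp) hc

theorem rowScanA_iff (c : Int) (data : List (List Int)) :
    rowScanA c data = true ↔ ∃ row ∈ data, c ∈ row := by
  induction data with
  | nil => simp [rowScanA]
  | cons row rest ih =>
    simp only [rowScanA]
    by_cases h : find_index row c = []
    · have hc : c ∉ row := (find_index_eq_nil_iff row c).mp h
      simp [h, ih]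
      intro hcr; exact absurd hcr hc
    · have hc : c ∈ row := by
        by_contra hn
        exact h ((find_index_eq_nil_iff row c).mpr hn)
      simp [h]
      exact Or.inl hc

theorem mem_update_iff (s : PySem.Set Int) (row : List Int) (c : Int) :
    c ∈ PySem.Set.update s row ↔ c ∈ s ∨ c ∈ row := by
  induction row generalizing s with
  | nil => simp [PySem.Set.update]
  | cons x xs ih =>
    have h : PySem.Set.update s (x :: xs) = PySem.Set.update (PySem.Set.add s x) xs := rfl
    rw [h, ih]
    simp [PySem.Set.mem_add]
    tauto

theorem mem_seen_iff (data : List (List Int)) (s : PySem.Set Int) (c : Int) :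
    c ∈ data.foldl (fun s row => PySem.Set.update s row) s ↔ c ∈ s ∨ ∃ row ∈ data, c ∈ row := by
  induction data generalizing s with
  | nil => simp
  | cons row rest ih =>
    simp only [List.foldl_cons, ih, mem_update_iff]
    constructor
    · rintro ((h | h) | ⟨r, hr, hcm⟩)
      · exact Or.inl h
      · exact Or.inr ⟨row, by simp, h⟩
      · exact Or.inr ⟨r, by simp [hr], hcm⟩
    · rintro (h | ⟨r, hr, hcm⟩)
      · exact Or.inl (Or.inl h)
      · rcases List.mem_cons.mp hr with h2 | h2
        · exact Or.inl (Or.inr (h2 ▸ hcm))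
        · exact Or.inr ⟨r, h2, hcm⟩

-- ===== VERDICT (by name: the statement is the Claim_ definition above) =====
theorem get_used_color_spec : Claim_equal_get_used_color := by
  intro data _
  show get_used_color data = get_used_color_alt data
  unfold get_used_color get_used_color_alt
  rw [show (fun (used : List Int) (c : Int) => if rowScanA c data then used ++ [c] else used)
      = (fun used c => if (fun c => rowScanA c data) c then used ++ [id c] else used) from rfl,
    PySem.List.foldl_append_if (fun c => rowScanA c data) id]
  simp only [List.nil_append, List.map_id]
  apply List.filter_congr
  intro c _
  apply Bool.eq_iff_iff.mpr
  rw [rowScanA_iff, PySem.Set.contains_iff, mem_seen_iff]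
  simp [PySem.Set.empty]
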